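-- pv_equiv track=rewrite | github.com/martin-papy/pdf2foundry-gui | src/core/config.py | sanitize_preset_name
-- ===== SOURCE A (Python) =====
-- def sanitize_preset_name(name: str) -> str:
--     """
--     Sanitize a preset name to create a safe filename.
--
--     Converts to lowercase, replaces spaces and special characters with hyphens,
--     and removes any characters that aren't alphanumeric, hyphens, or underscores.
--
--     Args:
--         name: The human-readable preset name
--
--     Returns:
--         A sanitized filename-safe string
--     """
--     # Convert to lowercase and replace spaces with hyphens
--     sanitized = name.lower().replace(" ", "-")
--
--     # Keep only alphanumeric, hyphens, and underscores
--     sanitized = "".join(c for c in sanitized if c.isalnum() or c in "-_")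
--
--     # Remove multiple consecutive hyphens
--     while "--" in sanitized:
--         sanitized = sanitized.replace("--", "-")
--
--     # Remove leading/trailing hyphens
--     sanitized = sanitized.strip("-")
--
--     # Ensure we have something left
--     if not sanitized:
--         sanitized = "preset"
--
--     return sanitized
-- ===== SOURCE B (Python) =====
-- def sanitize_preset_name(name: str) -> str:
--     # Single stateful pass: filter and hyphen-run collapse fused, instead of
--     # A's separate filter pass + repeated "--" replacement loop.
--     s = name.lower().replace(" ", "-")
--     out = []
--     for c in s:
--         if c.isalnum() or c == "_":
--             out.append(c)
--         elif c == "-" and (not out or out[-1] != "-"):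
--             out.append(c)
--     res = "".join(out).strip("-")
--     return res or "preset"
-- ===== Notes on version B (the rewrite author's own statement) =====
-- stated objective: alternative
-- what changed: A's three stages (filter pass, repeated '--'-replacement loop until fixpoint, strip) are replaced by a single stateful pass that filters and collapses hyphen runs at once by checking the last emitted character.
import Mathlib
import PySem

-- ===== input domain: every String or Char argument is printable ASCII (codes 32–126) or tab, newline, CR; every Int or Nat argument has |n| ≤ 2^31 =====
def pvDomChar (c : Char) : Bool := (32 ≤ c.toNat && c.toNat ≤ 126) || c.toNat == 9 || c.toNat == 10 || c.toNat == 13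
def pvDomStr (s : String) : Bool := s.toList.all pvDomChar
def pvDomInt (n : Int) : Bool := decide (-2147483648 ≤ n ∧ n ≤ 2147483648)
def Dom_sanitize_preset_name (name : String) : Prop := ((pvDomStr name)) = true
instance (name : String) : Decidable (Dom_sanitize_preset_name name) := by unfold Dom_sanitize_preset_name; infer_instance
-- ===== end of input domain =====

-- B fuses A's filter pass and repeated "--"-replacement loop into one stateful pass; same return value, alternative decomposition.

-- ===== PORT A =====
-- helper used only to prove termination of A's while-loop port:
-- one left-to-right pass of sanitized.replace("--", "-")
def pvRepOnce : List Char → List Char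
  | [] => []
  | [c] => [c]
  | a :: b :: t => if a = '-' ∧ b = '-' then '-' :: pvRepOnce t else a :: pvRepOnce (b :: t)

theorem pvRepOnce_length_le (s : List Char) : (pvRepOnce s).length ≤ s.length := by
  induction s using pvRepOnce.induct with
  | case1 => simp [pvRepOnce]
  | case2 c => simp [pvRepOnce]
  | case3 a b t h ih => simp [pvRepOnce, h]; omega
  | case4 a b t h ih => simp [pvRepOnce, h]; simpa using ih

theorem pvGo_eq (fuel : Nat) : ∀ (l acc : List Char), l.length ≤ fuel →
    PySem.Chars.replace.go ['-', '-'] ['-'] fuel l acc = acc.reverse ++ pvRepOnce l := by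
  induction fuel with
  | zero =>
    intro l acc h
    have : l = [] := List.eq_nil_of_length_eq_zero (Nat.le_zero.mp h)
    subst this; simp [PySem.Chars.replace.go, pvRepOnce]
  | succ n ih =>
    intro l acc h
    match l with
    | [] => simp [PySem.Chars.replace.go, pvRepOnce]
    | [c] =>
      have hpre : List.isPrefixOf ['-', '-'] [c] = false := by simp [List.isPrefixOf]
      simp only [PySem.Chars.replace.go, hpre, Bool.false_eq_true, if_false]
      rw [ih [] (c :: acc) (by simp)]
      simp [pvRepOnce]
    | a :: b :: t =>
      by_cases hab : a = '-' ∧ b = '-'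
      · obtain ⟨ha, hb⟩ := hab; subst ha; subst hb
        have hpre : List.isPrefixOf ['-', '-'] ('-' :: '-' :: t) = true := by
          simp [List.isPrefixOf]
        simp only [PySem.Chars.replace.go, hpre, if_true]
        rw [show List.drop (['-', '-'] : List Char).length ('-' :: '-' :: t) = t from rfl]
        rw [ih t (['-'].reverse ++ acc) (by simp at h ⊢; omega)]
        simp [pvRepOnce]
      · have hpre : List.isPrefixOf ['-', '-'] (a :: b :: t) = false := by
          simp [List.isPrefixOf]
          intro ha hb; exact hab ⟨ha.symm, hb.symm⟩
        simp only [PySem.Chars.replace.go, hpre, Bool.false_eq_true, if_false]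
        rw [ih (b :: t) (a :: acc) (by simp at h ⊢; omega)]
        simp [pvRepOnce, hab]

theorem pvReplace_dd (s : List Char) :
    PySem.Chars.replace s ['-', '-'] ['-'] = pvRepOnce s := by
  have h := pvGo_eq s.length s [] le_rfl
  simpa [PySem.Chars.replace] using h

theorem pvRepOnce_length_lt (s : List Char) (h : ['-', '-'] <:+: s) :
    (pvRepOnce s).length < s.length := by
  induction s using pvRepOnce.induct with
  | case1 => simp at h
  | case2 c =>
    exfalso
    have := h.sublist.length_le
    simp at this
  | case3 a b t hc ih =>
    obtain ⟨ha, hb⟩ := hc; subst ha; subst hb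
    have := pvRepOnce_length_le t
    simp [pvRepOnce]; omega
  | case4 a b t hc ih =>
    have h' : ['-', '-'] <:+: b :: t := by
      rcases (List.infix_cons_iff).mp h with hp | hi
      · exfalso
        rcases hp with ⟨r, hr⟩
        cases hr
        exact hc ⟨rfl, rfl⟩
      · exact hi
    have := ih h'
    simp [pvRepOnce, hc]
    simp at this
    omega

-- A's code, step for step: lower + replace(" ","-"), filter, while "--": replace, strip("-"), default
def pvCollapse (s : List Char) : List Char :=
  if PySem.Chars.isIn ['-', '-'] s then pvCollapse (PySem.Chars.replace s ['-', '-'] ['-']) else s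
termination_by s.length
decreasing_by
  rw [pvReplace_dd]
  exact pvRepOnce_length_lt _ ((PySem.Chars.isIn_iff_infix _ _).mp (by assumption))

def sanitize_preset_name (name : String) : String :=
  pvFinishA
    (PySem.Chars.stripChars
      (pvCollapse
        ((PySem.Chars.replace (PySem.Chars.lower name.toList) [' '] ['-']).filter
          (fun c => PySem.Chars.isalnum c || PySem.Chars.isIn [c] ['-', '_'])))
      ['-'])
where
  -- 'if not sanitized: sanitized = "preset"'
  pvFinishA (stripped : List Char) : String :=
    if stripped.isEmpty then "preset" else String.ofList stripped

-- ===== PORT B =====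
-- B's code: one pass with the output list as state (append unless filtered out,
-- and skip a '-' whenever the output already ends in '-')
def pvGoB (acc : List Char) : List Char → List Char
  | [] => acc
  | c :: t =>
    if PySem.Chars.isalnum c || c = '_' then pvGoB (acc ++ [c]) t
    else if c = '-' && (acc.isEmpty || acc.getLast? != some '-') then pvGoB (acc ++ [c]) t
    else pvGoB acc t

def sanitize_preset_name_alt (name : String) : String :=
  pvFinishB
    (PySem.Chars.stripChars
      (pvGoB [] (PySem.Chars.replace (PySem.Chars.lower name.toList) [' '] ['-']))
      ['-'])
where
  -- 'return res or "preset"'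
  pvFinishB (res : List Char) : String :=
    if res.isEmpty then "preset" else String.ofList res

-- ===== PRECONDITION & SPEC =====
def Spec_sanitize_preset_name (name : String) (out : String) : Prop := out = sanitize_preset_name_alt name
instance (name : String) (out : String) : Decidable (Spec_sanitize_preset_name name out) := by unfold Spec_sanitize_preset_name; infer_instance

-- ===== CLAIM (what is proved, stated in full; the proofs are below) =====
def Claim_equal_sanitize_preset_name : Prop := ∀ (name : String), Dom_sanitize_preset_name name → Spec_sanitize_preset_name name (sanitize_preset_name name)

-- ===== LEMMAS AND PROOFS =====

-- hyphen-run squeezer with a "last emitted char was '-'" flag (post-filter alphabet)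
def pvSq (f : Bool) : List Char → List Char
  | [] => []
  | c :: t => if c = '-' then (if f then pvSq true t else '-' :: pvSq true t) else c :: pvSq false t

-- the same squeezer with A's filter fused in (this is what B's pass computes)
def pvSqF (f : Bool) : List Char → List Char
  | [] => []
  | c :: t =>
    if PySem.Chars.isalnum c || c = '_' then c :: pvSqF false t
    else if c = '-' then (if f then pvSqF true t else '-' :: pvSqF true t)
    else pvSqF f t

theorem pvSq_repOnce (s : List Char) : ∀ f, pvSq f (pvRepOnce s) = pvSq f s := by
  induction s using pvRepOnce.induct with
  | case1 => intro f; rfl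
  | case2 c => intro f; rfl
  | case3 a b t hc ih =>
    obtain ⟨ha, hb⟩ := hc; subst ha; subst hb
    intro f
    cases f <;> simp [pvRepOnce, pvSq, ih]
  | case4 a b t hc ih =>
    intro f
    simp only [pvRepOnce, if_neg hc]
    by_cases ha : a = '-' <;> simp [pvSq, ha, ih]

theorem pvSq_noDD (s : List Char) (h : ¬ (['-', '-'] <:+: s)) :
    ∀ f, (f = true → s.head? ≠ some '-') → pvSq f s = s := by
  induction s with
  | nil => intro f _; rfl
  | cons c t ih =>
    intro f hf
    have ht : ¬ (['-', '-'] <:+: t) := fun hi => h (hi.trans (List.suffix_cons c t).isInfix)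
    by_cases hc : c = '-'
    · subst hc
      cases f with
      | true => exact absurd rfl (hf rfl)
      | false =>
        have hth : t.head? ≠ some '-' := by
          intro hh
          cases t with
          | nil => simp at hh
          | cons d t' =>
            simp at hh; subst hh
            exact h ⟨[], t', rfl⟩
        simp [pvSq, ih ht true (fun _ => hth)]
    · simp [pvSq, hc, ih ht false (by simp)]

theorem pvCollapse_eq (s : List Char) : pvCollapse s = pvSq false s := by
  induction s using pvCollapse.induct with
  | case1 s h ih =>
    rw [pvCollapse, if_pos h, ih, pvReplace_dd, pvSq_repOnce]
  | case2 s h =>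
    rw [pvCollapse, if_neg h]
    have hni : ¬ (['-', '-'] <:+: s) := fun hi => h ((PySem.Chars.isIn_iff_infix _ _).mpr hi)
    exact (pvSq_noDD s hni false (by simp)).symm

theorem pvMemDU (c : Char) : PySem.Chars.isIn [c] ['-', '_'] = (c == '-' || c == '_') := by
  by_cases h : c = '-' ∨ c = '_'
  · rcases h with h | h <;> subst h <;> decide
  · rw [not_or] at h
    have hni : ¬ ([c] <:+: ['-', '_']) := by
      intro hi
      have hm : c ∈ ['-', '_'] := hi.sublist.subset (List.mem_singleton_self c)
      simp at hm
      rcases hm with hm | hm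
      · exact h.1 hm
      · exact h.2 hm
    have hne : PySem.Chars.isIn [c] ['-', '_'] ≠ true :=
      fun ht => hni ((PySem.Chars.isIn_iff_infix _ _).mp ht)
    simp [Bool.not_eq_true] at hne
    simp [hne, h.1, h.2]

theorem pvSq_filter (s : List Char) :
    ∀ f, pvSq f (s.filter (fun c => PySem.Chars.isalnum c || PySem.Chars.isIn [c] ['-', '_'])) = pvSqF f s := by
  induction s with
  | nil => intro f; rfl
  | cons c t ih =>
    intro f
    by_cases hc : c = '-'
    · subst hc
      have hin : PySem.Chars.isIn ['-'] ['-', '_'] = true := by decide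
      have hA : PySem.Chars.isalnum '-' = false := by decide
      cases f <;> simp [hin, hA, pvSqF, pvSq, ih]
    · by_cases hu : c = '_'
      · subst hu
        have hin : PySem.Chars.isIn ['_'] ['-', '_'] = true := by decide
        have hU : PySem.Chars.isalnum '_' = false := by decide
        simp [hin, hU, pvSqF, pvSq, ih]
      · by_cases ha : PySem.Chars.isalnum c = true
        · simp [ha, pvSqF, pvSq, hc, ih]
        · have hin : PySem.Chars.isIn [c] ['-', '_'] = false := by
            rw [pvMemDU]; simp [hc, hu]
          simp [ha, hin, hc, hu, pvSqF, ih]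

theorem pvAlnum_ne_dash (c : Char) (h : (PySem.Chars.isalnum c || c = '_') = true) : c ≠ '-' := by
  intro hc; subst hc
  simp at h
  exact absurd h (by decide)

theorem pvGoB_eq (t : List Char) : ∀ acc : List Char,
    pvGoB acc t = acc ++ pvSqF (acc.getLast? == some '-') t := by
  induction t with
  | nil => intro acc; simp [pvGoB, pvSqF]
  | cons c t ih =>
    intro acc
    have hA : PySem.Chars.isalnum '-' = false := by decide
    by_cases h1 : (PySem.Chars.isalnum c || c = '_') = true
    · have hcd : c ≠ '-' := pvAlnum_ne_dash c h1
      have hb : (c == '-') = false := by simp [hcd]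
      simp only [pvGoB, h1, if_true, ih]
      simp [pvSqF, h1, hb]
    · by_cases hc : c = '-'
      · subst hc
        by_cases h2 : acc.getLast? = some '-'
        · have hne : acc ≠ [] := by
            intro he; subst he; simp at h2
          simp only [pvGoB, h1, Bool.false_eq_true, if_false, ih]
          simp [pvSqF, hA, h2, hne]
        · simp only [pvGoB, h1, Bool.false_eq_true, if_false, ih]
          simp [pvSqF, hA, h2]
      · have hcond : (c = '-' && (acc.isEmpty || acc.getLast? != some '-')) = false := by
          simp [hc]
        simp only [pvGoB, h1, Bool.false_eq_true, if_false, hcond, ih]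
        simp [pvSqF, h1, hc]

theorem pvCore_eq (s : List Char) :
    pvCollapse (s.filter (fun c => PySem.Chars.isalnum c || PySem.Chars.isIn [c] ['-', '_'])) = pvGoB [] s := by
  rw [pvCollapse_eq, pvSq_filter, pvGoB_eq]
  rfl

-- ===== VERDICT (by name: the statement is the Claim_ definition above) =====
theorem sanitize_preset_name_spec : Claim_equal_sanitize_preset_name := by
  intro name _
  unfold Spec_sanitize_preset_name sanitize_preset_name sanitize_preset_name_alt
  rw [pvCore_eq]
  rfl
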